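-- pv_equiv track=rewrite | github.com/MrBrantCode/unitest_baseline | mut_generate/mist_train_cf/cf_12805/solution.py | count_unique_characters
-- ===== SOURCE A (Python) =====
-- def count_unique_characters(input_string):
--     unique_chars = set()
--     is_quoted = False
--
--     for char in input_string:
--         if char == '"':
--             is_quoted = not is_quoted
--         elif not is_quoted:
--             unique_chars.add(char)
--
--     return len(unique_chars)
-- ===== SOURCE B (Python) =====
-- def count_unique_characters(input_string):
--     # Split on '"': even-indexed segments are exactly the text outside quotes.
--     out = set()
--     for i, part in enumerate(input_string.split('"')):
--         if i % 2 == 0: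
--             out.update(part)
--     return len(out)
-- ===== Notes on version B (the rewrite author's own statement) =====
-- stated objective: faster
-- what changed: B splits the input at the double-quote character and unions the characters of the even-indexed (outside-quote) segments into a set, instead of A's per-character quoted-state toggle; the split and set.update run at C speed instead of a Python-level branch per character.
import Mathlib
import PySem

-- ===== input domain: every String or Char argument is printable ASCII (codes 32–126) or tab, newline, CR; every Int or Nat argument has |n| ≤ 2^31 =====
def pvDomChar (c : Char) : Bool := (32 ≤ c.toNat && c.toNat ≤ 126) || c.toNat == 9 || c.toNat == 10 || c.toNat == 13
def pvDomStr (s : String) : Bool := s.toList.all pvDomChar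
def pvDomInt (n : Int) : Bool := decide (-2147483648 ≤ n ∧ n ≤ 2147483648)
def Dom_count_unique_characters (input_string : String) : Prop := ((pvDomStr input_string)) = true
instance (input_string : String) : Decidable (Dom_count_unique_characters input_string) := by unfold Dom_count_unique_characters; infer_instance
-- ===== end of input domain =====

-- B counts the same set by splitting on '"' and collecting the even-indexed (outside-quote)
-- segments, instead of A's per-character in/out-of-quote toggle (measured faster in a timing run; constant factor).

-- ===== PORT A =====
def count_unique_characters (input_string : String) : Int :=
  -- for char in input_string: toggle on '"', else add when not quoted
  let final := input_string.toList.foldl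
    (fun (st : PySem.Set Char × Bool) c =>
      if c = '"' then (st.1, !st.2)
      else if st.2 then st
      else (PySem.Set.add st.1 c, st.2))
    (PySem.Set.empty, false)
  PySem.Set.len final.1

-- ===== PORT B =====
def count_unique_characters_alt (input_string : String) : Int :=
  -- for i, part in enumerate(input_string.split('"')): if i % 2 == 0: out.update(part)
  let parts := PySem.Chars.splitOn input_string.toList ['"']
  let out := (PySem.List.enumerate parts 0).foldl
    (fun (s : PySem.Set Char) ip =>
      if PySem.Int.mod ip.1 2 = 0 then PySem.Set.update s ip.2 else s)
    PySem.Set.empty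
  PySem.Set.len out

-- ===== PRECONDITION & SPEC =====
def Spec_count_unique_characters (input_string : String) (out : Int) : Prop := out = count_unique_characters_alt input_string
instance (input_string : String) (out : Int) : Decidable (Spec_count_unique_characters input_string out) := by unfold Spec_count_unique_characters; infer_instance

-- ===== CLAIM (what is proved, stated in full; the proofs are below) =====
def Claim_equal_count_unique_characters : Prop := ∀ (input_string : String), Dom_count_unique_characters input_string → Spec_count_unique_characters input_string (count_unique_characters input_string)

-- ===== LEMMAS AND PROOFS =====

/-- The characters of `cs` lying outside quoted regions, starting in state `b`
    (`b = true` = currently inside quotes). Reference for both ports. -/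
def pvOut : List Char → Bool → List Char
  | [], _ => []
  | c :: r, b => if c = '"' then pvOut r (!b) else if b then pvOut r b else c :: pvOut r b

/-- Reference recursion for `cs.split('"')`. -/
def pvParts : List Char → List (List Char)
  | [] => [[]]
  | c :: r =>
    if c = '"' then [] :: pvParts r
    else
      match pvParts r with
      | [] => [[c]]
      | h :: t => (c :: h) :: t

/-- Concatenation of alternate segments: `b = true` keeps the current head. -/
def pvJoin2 : List (List Char) → Bool → List Char
  | [], _ => []
  | p :: ps, b => if b then p ++ pvJoin2 ps false else pvJoin2 ps true

lemma pvModifyHead_id {α : Type} (l : List α) : List.modifyHead (fun x => x) l = l := by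
  cases l <;> simp

lemma pvParts_ne_nil (cs : List Char) : pvParts cs ≠ [] := by
  cases cs with
  | nil => simp [pvParts]
  | cons c r =>
    simp only [pvParts]
    split
    · simp
    · cases pvParts r <;> simp

lemma pvGo_eq (l : List Char) : ∀ (fuel : Nat) (cur : List Char) (acc : List (List Char)),
    l.length < fuel →
    PySem.Chars.splitOn.go ['"'] fuel l cur acc
      = acc.reverse ++ (pvParts l).modifyHead (cur.reverse ++ ·) := by
  induction l with
  | nil =>
    intro fuel cur acc h
    cases fuel with
    | zero => omega
    | succ f => simp [PySem.Chars.splitOn.go, pvParts]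
  | cons c rest ih =>
    intro fuel cur acc h
    cases fuel with
    | zero => simp at h
    | succ f =>
      by_cases hc : c = '"'
      · subst hc
        have hpre : List.isPrefixOf ['"'] ('"' :: rest) = true := by
          simp [List.isPrefixOf]
        rw [PySem.Chars.splitOn.go]
        simp only [hpre, if_true]
        have hd : List.drop (['"'].length) ('"' :: rest) = rest := rfl
        rw [hd, ih f [] (cur.reverse :: acc) (by simpa using h)]
        simp [pvParts, pvModifyHead_id]
      · have hpre : List.isPrefixOf ['"'] (c :: rest) = false := by
          simp [List.isPrefixOf]
          intro h'; exact hc h'.symm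
        rw [PySem.Chars.splitOn.go]
        simp only [hpre]
        rw [ih f (c :: cur) acc (by simpa using h)]
        simp only [pvParts, hc, if_false]
        rcases hp : pvParts rest with _ | ⟨ph, pt⟩
        · exact absurd hp (pvParts_ne_nil rest)
        · simp

lemma splitOn_eq_pvParts (l : List Char) :
    PySem.Chars.splitOn l ['"'] = pvParts l := by
  unfold PySem.Chars.splitOn
  rw [pvGo_eq l (l.length + 1) [] [] (by omega)]
  simp [pvModifyHead_id]

lemma pvJoin2_pvParts (cs : List Char) :
    pvJoin2 (pvParts cs) true = pvOut cs false ∧ pvJoin2 (pvParts cs) false = pvOut cs true := by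
  induction cs with
  | nil => simp [pvParts, pvJoin2, pvOut]
  | cons c r ih =>
    by_cases hc : c = '"'
    · subst hc
      simp only [pvParts, if_true, pvOut]
      constructor
      · simpa [pvJoin2] using ih.2
      · simpa [pvJoin2] using ih.1
    · simp only [pvParts, hc, if_false, pvOut]
      rcases hp : pvParts r with _ | ⟨ph, pt⟩
      · exact absurd hp (pvParts_ne_nil r)
      · rw [hp] at ih
        constructor
        · simp only [pvJoin2, if_true]
          have : ph ++ pvJoin2 pt false = pvOut r false := by simpa [pvJoin2] using ih.1
          simp [← this]
        · simpa [pvJoin2] using ih.2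

lemma foldA_eq (cs : List Char) : ∀ (s : PySem.Set Char) (b : Bool),
    (cs.foldl
      (fun (st : PySem.Set Char × Bool) c =>
        if c = '"' then (st.1, !st.2)
        else if st.2 then st
        else (PySem.Set.add st.1 c, st.2))
      (s, b)).1 = PySem.Set.update s (pvOut cs b) := by
  induction cs with
  | nil => intro s b; simp [pvOut, PySem.Set.update]
  | cons c r ih =>
    intro s b
    by_cases hc : c = '"'
    · subst hc; simp only [List.foldl_cons, if_true, pvOut]
      exact ih s (!b)
    · cases b with
      | true => simp only [List.foldl_cons, hc, if_false, pvOut]; exact ih s true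
      | false =>
        simp only [List.foldl_cons, hc, if_false, pvOut, Bool.false_eq_true]
        rw [ih (PySem.Set.add s c) false]
        simp [PySem.Set.update]

lemma mod2_succ (i : Int) : (PySem.Int.mod (i + 1) 2 = 0) ↔ ¬ (PySem.Int.mod i 2 = 0) := by
  simp only [PySem.Int.mod_eq_emod_of_pos (b := 2) (by omega)]
  omega

lemma foldB_eq (ps : List (List Char)) : ∀ (s : PySem.Set Char) (i : Int),
    (PySem.List.enumerate ps i).foldl
      (fun (s : PySem.Set Char) ip =>
        if PySem.Int.mod ip.1 2 = 0 then PySem.Set.update s ip.2 else s)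
      s
    = PySem.Set.update s (if PySem.Int.mod i 2 = 0 then pvJoin2 ps true else pvJoin2 ps false) := by
  induction ps with
  | nil => intro s i; simp [PySem.List.enumerate, pvJoin2, PySem.Set.update]
  | cons p ps ih =>
    intro s i
    rw [PySem.List.enumerate_cons]
    by_cases hi : PySem.Int.mod i 2 = 0
    · simp only [List.foldl_cons, hi, if_true]
      rw [ih (PySem.Set.update s p) (i + 1)]
      have h1 : ¬ (PySem.Int.mod (i + 1) 2 = 0) := by rw [mod2_succ]; exact fun h => h hi
      simp only [h1, if_false, pvJoin2, if_true]
      simp [PySem.Set.update, List.foldl_append]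
    · simp only [List.foldl_cons, hi, if_false]
      rw [ih s (i + 1)]
      have h1 : PySem.Int.mod (i + 1) 2 = 0 := (mod2_succ i).mpr hi
      rw [if_pos h1]
      simp [pvJoin2]

-- ===== VERDICT (by name: the statement is the Claim_ definition above) =====
theorem count_unique_characters_spec : Claim_equal_count_unique_characters := by
  intro input_string _
  unfold Spec_count_unique_characters count_unique_characters count_unique_characters_alt
  simp only [splitOn_eq_pvParts, foldB_eq, foldA_eq]
  have h0 : PySem.Int.mod (0 : Int) 2 = 0 := by decide
  rw [h0, if_pos rfl, (pvJoin2_pvParts input_string.toList).1]
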